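-- pv_equiv track=rewrite | github.com/vnikov/Fall-2017 | CS111/PS2/ps2pr3.py | compare
-- ===== SOURCE A (Python) =====
-- def compare(list1, list2):
--     ''' return the number of values in list1 that are
--     smaller than their corresponding value in list2 '''
--     if len(list1) == 0 or len(list2) == 0:
--         return 0
--     else:
--         if list1[0] < list2[0]:
--             return 1 + compare(list1[1:], list2[1:])
--         else:
--             return compare(list1[1:], list2[1:])
-- ===== SOURCE B (Python) =====
-- def compare(list1, list2):
--     count = 0
--     for x, y in zip(list1, list2):
--         if x < y:
--             count += 1
--     return count
-- ===== Notes on version B (the rewrite author's own statement) =====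
-- stated objective: idiomatic
-- what changed: Replaces the slicing recursion with a single iterative zip loop accumulating a counter.
import Mathlib
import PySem

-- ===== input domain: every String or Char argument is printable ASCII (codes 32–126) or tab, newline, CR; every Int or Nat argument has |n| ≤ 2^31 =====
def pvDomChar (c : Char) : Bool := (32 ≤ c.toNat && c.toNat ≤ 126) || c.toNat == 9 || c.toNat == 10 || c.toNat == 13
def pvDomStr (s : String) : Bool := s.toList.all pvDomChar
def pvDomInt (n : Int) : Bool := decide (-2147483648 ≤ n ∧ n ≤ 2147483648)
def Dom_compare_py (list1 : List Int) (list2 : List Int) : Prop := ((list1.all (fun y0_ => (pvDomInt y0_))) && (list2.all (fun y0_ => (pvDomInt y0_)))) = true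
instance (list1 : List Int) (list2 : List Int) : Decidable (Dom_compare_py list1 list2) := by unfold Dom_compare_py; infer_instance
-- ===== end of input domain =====

-- B replaces A's slicing recursion by one iterative zip loop with a counter (idiomatic).

-- ===== PORT A =====
-- literal port of A's recursion: base case on either list empty, recurse on tails (xs[1:])
def compare_py (list1 : List Int) (list2 : List Int) : Int :=
  if list1.length = 0 ∨ list2.length = 0 then 0
  else
    if (PySem.List.pyGet? list1 0).getD 0 < (PySem.List.pyGet? list2 0).getD 0 then
      1 + compare_py (PySem.List.slice list1 (some 1) none) (PySem.List.slice list2 (some 1) none)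
    else
      compare_py (PySem.List.slice list1 (some 1) none) (PySem.List.slice list2 (some 1) none)
termination_by list1.length
decreasing_by
  all_goals
    rw [PySem.List.slice_from_one]
    cases list1 with
    | nil => simp_all
    | cons a t => simp

-- ===== PORT B =====
-- port of Source B: fold over zip, incrementing a counter
def compare_py_alt (list1 : List Int) (list2 : List Int) : Int :=
  (List.zip list1 list2).foldl (fun count p => if p.1 < p.2 then count + 1 else count) 0

-- ===== PRECONDITION & SPEC =====
def Spec_compare_py (list1 : List Int) (list2 : List Int) (out : Int) : Prop := out = compare_py_alt list1 list2
instance (list1 : List Int) (list2 : List Int) (out : Int) : Decidable (Spec_compare_py list1 list2 out) := by unfold Spec_compare_py; infer_instance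

-- ===== CLAIM (what is proved, stated in full; the proofs are below) =====
def Claim_equal_compare_py : Prop := ∀ (list1 : List Int) (list2 : List Int), Dom_compare_py list1 list2 → Spec_compare_py list1 list2 (compare_py list1 list2)

-- ===== LEMMAS AND PROOFS =====

lemma foldl_count_shift (l : List (Int × Int)) (c : Int) :
    l.foldl (fun count p => if p.1 < p.2 then count + 1 else count) c
      = c + l.foldl (fun count p => if p.1 < p.2 then count + 1 else count) 0 := by
  induction l generalizing c with
  | nil => simp
  | cons p t ih =>
    simp only [List.foldl_cons]
    rw [ih, ih (if p.1 < p.2 then (0:Int) + 1 else 0)]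
    split_ifs <;> ring

lemma compare_eq_alt (list1 list2 : List Int) :
    compare_py list1 list2 = compare_py_alt list1 list2 := by
  induction list1 generalizing list2 with
  | nil => rw [compare_py]; simp [compare_py_alt]
  | cons a t ih =>
    cases list2 with
    | nil => rw [compare_py]; simp [compare_py_alt]
    | cons b u =>
      rw [compare_py]
      have hget1 : (PySem.List.pyGet? (a :: t) 0).getD 0 = a := by
        simp [PySem.List.pyGet?, PySem.List.pyIdx?]
      have hget2 : (PySem.List.pyGet? (b :: u) 0).getD 0 = b := by
        simp [PySem.List.pyGet?, PySem.List.pyIdx?]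
      simp only [List.length_cons, PySem.List.slice_from_one, List.tail_cons, hget1, hget2,
        compare_py_alt, List.zip_cons_cons, List.foldl_cons]
      have hlen : ¬(t.length + 1 = 0 ∨ u.length + 1 = 0) := by omega
      rw [if_neg hlen]
      split_ifs with h
      · rw [foldl_count_shift, ih u]; simp [compare_py_alt]
      · rw [foldl_count_shift, ih u]; simp [compare_py_alt]

-- ===== VERDICT (by name: the statement is the Claim_ definition above) =====
theorem compare_py_spec : Claim_equal_compare_py := by
  intro l1 l2 _
  unfold Spec_compare_py
  exact compare_eq_alt l1 l2
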